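-- pv_equiv track=rewrite | github.com/gururajraop/Sudoku-KR | CNF_encoding.py | k_SAT
-- ===== SOURCE A (Python) =====
-- def reduce_clause(clause, k, var_count):
--     clause_1 = clause[:(k - 1)]
--     clause_2 = clause[(k - 1):]
--     clause_1.append(var_count + 1)
--     clause_2.append(-1 * (var_count + 1))
--
--     return clause_1, clause_2
--
-- def k_SAT(dim, code, k):
--     encode = []
--     variables = dim ** 3
--     for clause in code:
--
--         while len(clause) > k:
--             clause_1, clause_2 = reduce_clause(clause, k, variables)
--             clause = clause_2
--             encode.append(clause_1)
--             variables += 1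
--         encode.append(clause)
--
--     return encode, variables
-- ===== SOURCE B (Python) =====
-- def k_SAT(dim, code, k):
--     # Single pass per clause: compute the number of splits m in closed form,
--     # pre-extend the clause with all auxiliary negations, and emit the
--     # fixed-size chunks directly.
--     encode = []
--     variables = dim ** 3
--     for clause in code:
--         L = len(clause)
--         if L <= k:
--             encode.append(clause)
--             continue
--         m = -((L - k) // -(k - 2))  # ceil((L - k) / (k - 2))
--         s = clause + [-(variables + i) for i in range(1, m + 1)]
--         for i in range(m):
--             encode.append(s[i * (k - 1):(i + 1) * (k - 1)] + [variables + i + 1])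
--         encode.append(s[m * (k - 1):])
--         variables += m
--     return encode, variables
-- ===== Notes on version B (the rewrite author's own statement) =====
-- stated objective: alternative
-- what changed: Replaces A's while-loop that repeatedly re-slices the shrinking clause by a closed-form single pass: compute the number of splits by ceiling division, append all auxiliary negations once, and emit the fixed-size chunks directly.
import Mathlib
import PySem

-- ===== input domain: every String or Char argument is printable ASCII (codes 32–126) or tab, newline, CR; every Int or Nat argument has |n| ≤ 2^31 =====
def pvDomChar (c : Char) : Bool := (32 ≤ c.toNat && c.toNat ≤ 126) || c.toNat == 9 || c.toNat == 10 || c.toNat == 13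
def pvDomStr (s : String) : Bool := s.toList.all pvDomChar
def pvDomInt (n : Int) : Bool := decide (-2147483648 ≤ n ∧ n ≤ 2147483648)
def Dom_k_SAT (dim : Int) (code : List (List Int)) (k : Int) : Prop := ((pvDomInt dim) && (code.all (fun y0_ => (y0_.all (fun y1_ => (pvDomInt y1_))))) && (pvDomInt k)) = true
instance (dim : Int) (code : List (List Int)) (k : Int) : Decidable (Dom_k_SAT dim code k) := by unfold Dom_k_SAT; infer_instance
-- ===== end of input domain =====

-- B replaces A's repeated re-slicing of the shrinking clause by a single-pass closed-form
-- chunking (compute the number of splits by ceiling division, emit fixed-size segments once).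

-- ===== PORT A =====
def reduceClause (clause : List Int) (k varCount : Int) : List Int × List Int :=
  let clause1 := PySem.List.slice clause none (some (k - 1))
  let clause2 := PySem.List.slice clause (some (k - 1)) none
  (clause1 ++ [varCount + 1], clause2 ++ [(-1) * (varCount + 1)])

-- the 'while len(clause) > k' loop; fuel = the initial clause length bounds the
-- iteration count whenever the Python loop terminates (each step shortens the clause)
def kSatLoop (k : Int) : Nat → List Int → Int → List (List Int) → List (List Int) × Int
  | 0, clause, vbl, encode => (encode ++ [clause], vbl)
  | fuel + 1, clause, vbl, encode =>
    if k < (clause.length : Int) then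
      let p := reduceClause clause k vbl
      kSatLoop k fuel p.2 (vbl + 1) (encode ++ [p.1])
    else (encode ++ [clause], vbl)

def k_SAT (dim : Int) (code : List (List Int)) (k : Int) : List (List Int) × Int :=
  code.foldl (fun acc clause => kSatLoop k clause.length clause acc.2 acc.1) ([], dim ^ 3)

-- ===== PORT B =====
def chunkClause (clause : List Int) (k vbl : Int) : List (List Int) × Int :=
  if (clause.length : Int) ≤ k then ([clause], vbl)
  else
    let m := -(PySem.Int.floordiv ((clause.length : Int) - k) (-(k - 2)))
    let s := clause ++ (PySem.List.pyRange 1 (m + 1) 1).map (fun i => -(vbl + i))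
    ((PySem.List.pyRange 0 m 1).map
        (fun i => PySem.List.slice s (some (i * (k - 1))) (some ((i + 1) * (k - 1))) ++ [vbl + i + 1])
      ++ [PySem.List.slice s (some (m * (k - 1))) none],
     vbl + m)

def k_SAT_alt (dim : Int) (code : List (List Int)) (k : Int) : List (List Int) × Int :=
  code.foldl (fun acc clause =>
    let p := chunkClause clause k acc.2
    (acc.1 ++ p.1, p.2)) ([], dim ^ 3)

-- ===== PRECONDITION & SPEC =====
-- Pre_ excludes exactly the inputs where A's while-loop never terminates:
-- some clause longer than k with k < 3 (the remainder never gets shorter).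
def Pre_k_SAT (dim : Int) (code : List (List Int)) (k : Int) : Prop :=
  3 ≤ k ∨ ∀ c ∈ code, (c.length : Int) ≤ k
instance (dim : Int) (code : List (List Int)) (k : Int) : Decidable (Pre_k_SAT dim code k) := by unfold Pre_k_SAT; infer_instance

def pvWitness_k_SAT : Int × List (List Int) × Int := (2, [[1, 2, 3, 4, 5], [7]], 3)

def Spec_k_SAT (dim : Int) (code : List (List Int)) (k : Int) (out : List (List Int) × Int) : Prop := out = k_SAT_alt dim code k
instance (dim : Int) (code : List (List Int)) (k : Int) (out : List (List Int) × Int) : Decidable (Spec_k_SAT dim code k out) := by unfold Spec_k_SAT; infer_instance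

-- ===== CLAIM (what is proved, stated in full; the proofs are below) =====
def Claim_equal_k_SAT : Prop := ∀ (dim : Int) (code : List (List Int)) (k : Int), Dom_k_SAT dim code k → Pre_k_SAT dim code k → Spec_k_SAT dim code k (k_SAT dim code k)

-- ===== LEMMAS AND PROOFS =====

-- recursive reference form of B's chunking (proof helper only)
def crec (kn : Nat) : Nat → Int → List Int → List (List Int)
  | 0, _, s => [s]
  | mn + 1, vbl, s => (s.take kn ++ [vbl + 1]) :: crec kn mn (vbl + 1) (s.drop kn)

-- the auxiliary-negation tail B appends
def natNegs (vbl : Int) (mn : Nat) : List Int :=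
  (List.range mn).map (fun i : Nat => -(vbl + (i : Int) + 1))

lemma natNegs_succ (vbl : Int) (mn : Nat) :
    natNegs vbl (mn + 1) = -(vbl + 1) :: natNegs (vbl + 1) mn := by
  rw [natNegs, natNegs, List.range_succ_eq_map, List.map_cons, List.map_map]
  refine congrArg₂ List.cons (by norm_num) (List.map_congr_left ?_)
  intro i _
  simp [Function.comp]
  omega

lemma crec_eq (kn : Nat) : ∀ (mn : Nat) (s : List Int) (vbl : Int),
    ((List.range mn).map (fun i : Nat => (s.drop (i * kn)).take kn ++ [vbl + (i : Int) + 1]))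
      ++ [s.drop (mn * kn)] = crec kn mn vbl s := by
  intro mn
  induction mn with
  | zero => intro s vbl; simp [crec]
  | succ n ih =>
    intro s vbl
    rw [crec, ← ih (s.drop kn) (vbl + 1)]
    rw [List.range_succ_eq_map, List.map_cons, List.map_map, List.cons_append]
    refine congrArg₂ List.cons (by norm_num) (congrArg₂ List.append (List.map_congr_left ?_) ?_)
    · intro i _
      simp [Function.comp, List.drop_drop]
      constructor
      · have h : (i + 1) * kn = kn + i * kn := by ring
        rw [h]
      · omega
    · rw [List.drop_drop]
      have h : (n + 1) * kn = kn + n * kn := by ring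
      rw [h]

-- the m computed by B's ceiling division, characterised
lemma M_spec (L k : Int) (hk : 3 ≤ k) (hL : k < L) :
    L - k ≤ (-(PySem.Int.floordiv (L - k) (-(k - 2)))) * (k - 2) ∧
    (-(PySem.Int.floordiv (L - k) (-(k - 2)))) * (k - 2) < L - k + (k - 2) := by
  have hb : -(k - 2) < 0 := by omega
  have hmod := PySem.Int.mod_neg_bounds (a := L - k) hb
  have hdm := PySem.Int.floordiv_mul_add_mod (L - k) (-(k - 2))
  have h1 : PySem.Int.floordiv (L - k) (-(k - 2)) * -(k - 2)
      = -(PySem.Int.floordiv (L - k) (-(k - 2)) * (k - 2)) := by ring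
  constructor <;> nlinarith [hmod.1, hmod.2]

lemma chunkClause_eq_crec_long (clause : List Int) (k vbl : Int) (hk : 3 ≤ k)
    (hL : k < (clause.length : Int)) :
    chunkClause clause k vbl =
      (crec (k - 1).toNat (-(PySem.Int.floordiv ((clause.length : Int) - k) (-(k - 2)))).toNat
        vbl
        (clause ++ natNegs vbl (-(PySem.Int.floordiv ((clause.length : Int) - k) (-(k - 2)))).toNat),
       vbl + -(PySem.Int.floordiv ((clause.length : Int) - k) (-(k - 2)))) := by
  obtain ⟨hM1, hM2⟩ := M_spec (clause.length : Int) k hk hL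
  rw [chunkClause, if_neg (by omega : ¬ ((clause.length : Int) ≤ k))]
  set M : Int := -(PySem.Int.floordiv ((clause.length : Int) - k) (-(k - 2))) with hMdef
  have hMpos : 1 ≤ M := by nlinarith
  have hMnat : ((M.toNat : Int)) = M := Int.toNat_of_nonneg (by omega)
  have hkn : ((((k - 1).toNat : Nat) : Int)) = k - 1 := Int.toNat_of_nonneg (by omega)
  show (((PySem.List.pyRange 0 M 1).map
        (fun i => PySem.List.slice (clause ++ (PySem.List.pyRange 1 (M + 1) 1).map (fun i => -(vbl + i)))
          (some (i * (k - 1))) (some ((i + 1) * (k - 1))) ++ [vbl + i + 1]))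
      ++ [PySem.List.slice (clause ++ (PySem.List.pyRange 1 (M + 1) 1).map (fun i => -(vbl + i)))
          (some (M * (k - 1))) none],
     vbl + M) = _
  have hs : (PySem.List.pyRange 1 (M + 1) 1).map (fun i => -(vbl + i)) = natNegs vbl M.toNat := by
    rw [PySem.List.pyRange_one, natNegs]
    have h1 : M + 1 - 1 = M := by ring
    rw [h1, ← hMnat, Int.toNat_natCast, List.map_map]
    refine List.map_congr_left ?_
    intro i _
    simp [Function.comp]
    omega
  rw [hs]
  rw [← crec_eq (k - 1).toNat M.toNat (clause ++ natNegs vbl M.toNat) vbl]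
  refine congrArg₂ Prod.mk (congrArg₂ (· ++ ·) ?_ ?_) rfl
  · rw [PySem.List.pyRange_one]
    have h0 : M - 0 = M := by ring
    rw [h0, ← hMnat, Int.toNat_natCast, List.map_map]
    refine List.map_congr_left ?_
    intro j _
    simp only [Function.comp]
    have e1 : (0 + (j : Int)) * (k - 1) = ((j * (k - 1).toNat : Nat) : Int) := by
      push_cast [hkn]; ring
    have e2 : (0 + (j : Int) + 1) * (k - 1) = (((j + 1) * (k - 1).toNat : Nat) : Int) := by
      push_cast [hkn]; ring
    rw [e1, e2, PySem.List.slice_natCast]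
    have e3 : (j + 1) * (k - 1).toNat = j * (k - 1).toNat + (k - 1).toNat := by ring
    rw [e3, Nat.add_sub_cancel_left]
    have e4 : vbl + (0 + (j : Int)) + 1 = vbl + (j : Int) + 1 := by ring
    rw [e4]
  · have e5 : M * (k - 1) = ((M.toNat * (k - 1).toNat : Nat) : Int) := by
      rw [← hkn]
      conv_lhs => rw [← hMnat]
      exact (Nat.cast_mul _ _).symm
    rw [e5, PySem.List.slice_from_natCast]

lemma chunk_unroll (clause : List Int) (k vbl : Int) (hk : 3 ≤ k)
    (hL : k < (clause.length : Int)) :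
    chunkClause clause k vbl =
      ((PySem.List.slice clause none (some (k - 1)) ++ [vbl + 1]) ::
          (chunkClause (PySem.List.slice clause (some (k - 1)) none ++ [(-1) * (vbl + 1)]) k (vbl + 1)).1,
        (chunkClause (PySem.List.slice clause (some (k - 1)) none ++ [(-1) * (vbl + 1)]) k (vbl + 1)).2) := by
  have hkn : (((k - 1).toNat : Nat) : Int) = k - 1 := Int.toNat_of_nonneg (by omega)
  have hknlen : (k - 1).toNat ≤ clause.length := by omega
  rw [chunkClause_eq_crec_long clause k vbl hk hL]
  obtain ⟨hM1, hM2⟩ := M_spec (clause.length : Int) k hk hL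
  set M : Int := -(PySem.Int.floordiv ((clause.length : Int) - k) (-(k - 2))) with hMdef
  have hMpos : 1 ≤ M := by nlinarith
  have hMn : M.toNat = (M.toNat - 1) + 1 := by omega
  have hrs : PySem.List.slice clause (some (k - 1)) none = clause.drop (k - 1).toNat :=
    PySem.List.slice_from clause (by omega)
  have hneg1 : (-1 : Int) * (vbl + 1) = -(vbl + 1) := by ring
  set rest : List Int := clause.drop (k - 1).toNat ++ [-(vbl + 1)] with hrestdef
  have hrestlen : (rest.length : Int) = (clause.length : Int) - k + 2 := by
    simp only [hrestdef, List.length_append, List.length_drop, List.length_cons,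
      List.length_nil]
    omega
  have hrhs : chunkClause (PySem.List.slice clause (some (k - 1)) none ++ [(-1) * (vbl + 1)]) k (vbl + 1)
      = (crec (k - 1).toNat (M.toNat - 1) (vbl + 1) (rest ++ natNegs (vbl + 1) (M.toNat - 1)), vbl + M) := by
    rw [hrs, hneg1, ← hrestdef]
    by_cases hcase : (rest.length : Int) ≤ k
    · have hMone : M = 1 := by
        have h1 : M < 2 := by nlinarith
        omega
      rw [chunkClause, if_pos hcase, hMone]
      simp [crec, natNegs]
    · have hlong : k < (rest.length : Int) := by omega
      rw [chunkClause_eq_crec_long rest k (vbl + 1) hk hlong]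
      obtain ⟨hR1, hR2⟩ := M_spec (rest.length : Int) k hk hlong
      set R : Int := -(PySem.Int.floordiv ((rest.length : Int) - k) (-(k - 2))) with hRdef
      have e : R = M - 1 := by
        have h1 : R ≤ M - 1 := by nlinarith
        have h2 : M - 1 ≤ R := by nlinarith
        omega
      have e2 : R.toNat = M.toNat - 1 := by omega
      rw [e2]
      exact congrArg₂ Prod.mk rfl (by omega)
  obtain ⟨mn', hmn'⟩ : ∃ mn', M.toNat = mn' + 1 := ⟨M.toNat - 1, by omega⟩
  rw [hmn'] at hrhs ⊢
  simp only [Nat.add_sub_cancel] at hrhs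
  rw [hrhs]
  dsimp only
  rw [crec]
  refine congrArg₂ Prod.mk (congrArg₂ List.cons ?_ (congrArg (crec (k - 1).toNat mn' (vbl + 1)) ?_)) rfl
  · rw [List.take_append_of_le_length hknlen, PySem.List.slice_to clause (by omega)]
  · rw [List.drop_append_of_le_length hknlen, natNegs_succ, hrestdef, List.append_cons]

lemma loop_eq (k : Int) : ∀ (fuel : Nat) (clause : List Int) (vbl : Int) (encode : List (List Int)),
    clause.length ≤ fuel → ((clause.length : Int) ≤ k ∨ 3 ≤ k) →
    kSatLoop k fuel clause vbl encode =
      (encode ++ (chunkClause clause k vbl).1, (chunkClause clause k vbl).2) := by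
  intro fuel
  induction fuel with
  | zero =>
    intro clause vbl encode hf hpre
    have hk0 : (clause.length : Int) ≤ k := by
      rcases hpre with h | h
      · exact h
      · omega
    rw [kSatLoop, chunkClause, if_pos hk0]
  | succ n ih =>
    intro clause vbl encode hf hpre
    rw [kSatLoop]
    by_cases hcond : k < (clause.length : Int)
    · rw [if_pos hcond]
      have hk3 : 3 ≤ k := by
        rcases hpre with h | h
        · omega
        · exact h
      have hlen2 : (PySem.List.slice clause (some (k - 1)) none ++ [(-1) * (vbl + 1)]).length ≤ n := by
        rw [PySem.List.slice_from clause (by omega)]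
        simp only [List.length_append, List.length_drop, List.length_cons, List.length_nil]
        omega
      have hstep := ih (PySem.List.slice clause (some (k - 1)) none ++ [(-1) * (vbl + 1)])
        (vbl + 1) (encode ++ [PySem.List.slice clause none (some (k - 1)) ++ [vbl + 1]])
        hlen2 (Or.inr hk3)
      simp only [reduceClause]
      rw [hstep, chunk_unroll clause k vbl hk3 hcond]
      simp [List.append_assoc]
    · rw [if_neg hcond, chunkClause, if_pos (by omega : (clause.length : Int) ≤ k)]

lemma fold_eq (k : Int) : ∀ (cs : List (List Int)) (acc : List (List Int) × Int),
    (∀ c ∈ cs, ((c.length : Int) ≤ k ∨ 3 ≤ k)) →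
    cs.foldl (fun acc clause => kSatLoop k clause.length clause acc.2 acc.1) acc
      = cs.foldl (fun acc clause =>
          let p := chunkClause clause k acc.2
          (acc.1 ++ p.1, p.2)) acc := by
  intro cs
  induction cs with
  | nil => intro acc _; rfl
  | cons c cs ih =>
    intro acc hall
    rw [List.foldl_cons, List.foldl_cons]
    rw [loop_eq k c.length c acc.2 acc.1 le_rfl (hall c (by simp))]
    exact ih _ (fun d hd => hall d (by simp [hd]))

-- ===== VERDICT (by name: the statement is the Claim_ definition above) =====
theorem k_SAT_spec : Claim_equal_k_SAT := by
  intro dim code k _ hpre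
  have hpre' : 3 ≤ k ∨ ∀ c ∈ code, (c.length : Int) ≤ k := hpre
  show k_SAT dim code k = k_SAT_alt dim code k
  rw [k_SAT, k_SAT_alt]
  refine fold_eq k code ([], dim ^ 3) ?_
  intro c hc
  rcases hpre' with h | h
  · exact Or.inr h
  · exact Or.inl (h c hc)
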